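-- pv_equiv track=rewrite | github.com/ohad1s/OOP_Course_2022 | TA_11/data_structures.py | strong_letter
-- ===== SOURCE A (Python) =====
-- def strong_letter(my_str):
--     my_s_dict={}
--     abc="abcdefghijklmnopqrstuvwxyz"
--     for letter in my_str:
--         if letter in my_s_dict.keys():
--             my_s_dict[letter]+=1
--         else:
--             my_s_dict[letter]=1
--     for i in reversed(range(26)):
--         if my_s_dict.get(abc[i].upper(),0)>0 and my_s_dict.get(abc[i].lower(),0)>0:
--             return abc[i].upper()
--     return "NO"
-- ===== SOURCE B (Python) =====
-- def strong_letter(my_str):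
--     present = set(my_str)
--     strong = {ch.upper() for ch in present
--               if ch.isalpha() and ch.upper() in present and ch.lower() in present}
--     return max(strong) if strong else "NO"
-- ===== Notes on version B (the rewrite author's own statement) =====
-- stated objective: simpler
-- what changed: Replaces the frequency-count dict and the reversed 26-letter early-return scan with building the set of strong letters directly from the distinct characters of the string and taking its maximum.
import Mathlib
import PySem

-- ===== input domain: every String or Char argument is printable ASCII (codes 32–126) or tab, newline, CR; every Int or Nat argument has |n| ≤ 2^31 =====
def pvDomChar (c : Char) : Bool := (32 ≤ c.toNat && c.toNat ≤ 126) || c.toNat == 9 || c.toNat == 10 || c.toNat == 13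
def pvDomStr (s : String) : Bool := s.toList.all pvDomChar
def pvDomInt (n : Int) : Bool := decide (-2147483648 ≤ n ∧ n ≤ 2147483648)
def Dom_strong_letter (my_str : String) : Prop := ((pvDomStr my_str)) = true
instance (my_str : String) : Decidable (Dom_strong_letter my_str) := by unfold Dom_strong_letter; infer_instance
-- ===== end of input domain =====

-- B builds the set of strong letters from the distinct characters and takes its maximum,
-- replacing A's frequency dict plus reversed 26-letter early-return scan (objective: simpler).


-- ===== PORT A =====
def pvAbc : List Char := "abcdefghijklmnopqrstuvwxyz".toList

-- the counter loop: if letter in my_s_dict.keys(): my_s_dict[letter] += 1 else: my_s_dict[letter] = 1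
def pvStepA (d : PySem.Dict Char Int) (c : Char) : PySem.Dict Char Int :=
  if d.contains c then d.modify c 0 (· + 1) else d.insert c 1

-- for i in reversed(range(26)) with early return; abc[i] is always in range, so the getD default is never used
def pvScanA (d : PySem.Dict Char Int) : List Int → String
  | [] => "NO"
  | i :: rest =>
    let ch := PySem.List.pyGetD pvAbc i ' '
    if d.getD (PySem.Chars.upperChar ch) 0 > 0 && d.getD (PySem.Chars.lowerChar ch) 0 > 0 then
      String.ofList [PySem.Chars.upperChar ch]
    else
      pvScanA d rest

def strong_letter (my_str : String) : String :=
  pvScanA (my_str.toList.foldl pvStepA PySem.Dict.empty) ((PySem.List.pyRange 0 26).reverse)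

-- ===== PORT B =====
-- ch.isalpha()/ch.upper()/ch.lower() ported with the PySem char primitives (exact on the ASCII domain)
def strong_letter_alt (my_str : String) : String :=
  let present : PySem.Set Char := PySem.Set.ofList my_str.toList
  let strong : PySem.Set Char :=
    PySem.Set.ofList ((present.filter (fun ch =>
      PySem.Chars.isalpha ch && PySem.Set.contains present (PySem.Chars.upperChar ch)
        && PySem.Set.contains present (PySem.Chars.lowerChar ch))).map PySem.Chars.upperChar)
  match PySem.List.max? strong (fun c => c) with
  | some c => String.ofList [c]
  | none => "NO"

-- ===== PRECONDITION & SPEC =====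
def Spec_strong_letter (my_str : String) (out : String) : Prop := out = strong_letter_alt my_str
instance (my_str : String) (out : String) : Decidable (Spec_strong_letter my_str out) := by unfold Spec_strong_letter; infer_instance

-- ===== CLAIM (what is proved, stated in full; the proofs are below) =====
def Claim_equal_strong_letter : Prop := ∀ (my_str : String), Dom_strong_letter my_str → Spec_strong_letter my_str (strong_letter my_str)

-- ===== LEMMAS AND PROOFS =====
def upChar (i : Nat) : Char := Char.ofNat (65 + i)
def loChar (i : Nat) : Char := Char.ofNat (97 + i)

-- pvPb L n: letter n is "strong" in L (both cases occur)
def pvPb (L : List Char) (n : Nat) : Bool := decide (upChar n ∈ L) && decide (loChar n ∈ L)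

-- reference form of A's reversed early-return scan
def pvAFun (L : List Char) : Nat → String
  | 0 => "NO"
  | n + 1 => if pvPb L n then String.ofList [upChar n] else pvAFun L n

theorem get?_eq_none_of_not_contains (d : PySem.Dict Char Int) (c : Char)
    (h : ¬ d.contains c = true) : d.get? c = none := by
  simp only [PySem.Dict.get?, Option.map_eq_none_iff, List.find?_eq_none]
  intro p hp
  simp only [PySem.Dict.contains, List.any_eq_true, not_exists, not_and] at h
  simpa using h p hp

theorem pvStepA_eq : pvStepA = fun (d : PySem.Dict Char Int) c => d.modify c 0 (· + 1) := by
  funext d c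
  unfold pvStepA
  by_cases h : d.contains c = true
  · simp [h]
  · simp [h, PySem.Dict.modify, PySem.Dict.getD, get?_eq_none_of_not_contains d c h]

theorem count_spec (L : List Char) (c : Char) :
    (L.foldl pvStepA PySem.Dict.empty).getD c 0 = (L.count c : Int) := by
  rw [pvStepA_eq]
  have := PySem.Dict.getD_foldl_modify_add_one L PySem.Dict.empty c
  simpa [PySem.Dict.getD, PySem.Dict.get?, PySem.Dict.empty] using this

theorem abc_facts : ∀ i : Fin 26, pvAbc.getD i.val ' ' = loChar i.val
    ∧ PySem.Chars.upperChar (loChar i.val) = upChar i.val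
    ∧ PySem.Chars.lowerChar (loChar i.val) = loChar i.val := by decide

theorem scan_eq (L : List Char) (d : PySem.Dict Char Int)
    (hd : ∀ c, d.getD c 0 = (L.count c : Int)) :
    ∀ n : Nat, n ≤ 26 → pvScanA d ((PySem.List.pyRange 0 (n : Int)).reverse) = pvAFun L n := by
  intro n
  induction n with
  | zero => intro _; simp [pvScanA, pvAFun]
  | succ n ih =>
    intro hn
    have h26 : n < 26 := by omega
    have hrev : (PySem.List.pyRange 0 ((n+1 : Nat) : Int)).reverse
        = (n : Int) :: (PySem.List.pyRange 0 (n : Int)).reverse := by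
      rw [PySem.List.pyRange_zero_natCast, PySem.List.pyRange_zero_natCast,
        List.range_succ, List.map_append]
      simp
    rw [hrev]
    obtain ⟨h1, h2, h3⟩ := abc_facts ⟨n, h26⟩
    show (let ch := PySem.List.pyGetD pvAbc (n : Int) ' ';
      if d.getD (PySem.Chars.upperChar ch) 0 > 0 && d.getD (PySem.Chars.lowerChar ch) 0 > 0 then
        String.ofList [PySem.Chars.upperChar ch]
      else pvScanA d ((PySem.List.pyRange 0 (n : Int)).reverse)) = pvAFun L (n+1)
    rw [show PySem.List.pyGetD pvAbc (n : Int) ' ' = loChar n from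
      (PySem.List.pyGetD_natCast pvAbc n ' ').trans h1]
    simp only [h2, h3, hd]
    have hcond : ((L.count (upChar n) : Int) > 0 && (L.count (loChar n) : Int) > 0) = pvPb L n := by
      simp [pvPb, List.count_pos_iff]
    rw [hcond, pvAFun]
    by_cases hp : pvPb L n = true
    · simp [hp]
    · simp only [Bool.not_eq_true] at hp
      simp [hp, ih (by omega)]

theorem char_toNat_le {c d : Char} (h : c ≤ d) : c.toNat ≤ d.toNat := by
  simpa [Char.le_def, UInt32.le_iff_toNat_le] using h

theorem lower_case (ch : Char) (h : PySem.Chars.islower ch = true) :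
    ∃ n, n < 26 ∧ ch = loChar n ∧ PySem.Chars.upperChar ch = upChar n
      ∧ PySem.Chars.lowerChar ch = ch := by
  simp only [PySem.Chars.islower, Bool.and_eq_true, decide_eq_true_eq] at h
  have hlo : 97 ≤ ch.toNat := by simpa using char_toNat_le h.1
  have hhi : ch.toNat ≤ 122 := by simpa using char_toNat_le h.2
  refine ⟨ch.toNat - 97, by omega, ?_, ?_, ?_⟩
  · rw [loChar, show 97 + (ch.toNat - 97) = ch.toNat by omega, Char.ofNat_toNat]
  · rw [PySem.Chars.upperChar, if_pos]
    · rw [upChar]; congr 1; omega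
    · simp only [PySem.Chars.islower, Bool.and_eq_true, decide_eq_true_eq]; exact h
  · rw [PySem.Chars.lowerChar, if_neg]
    simp only [PySem.Chars.isupper, Bool.and_eq_true, decide_eq_true_eq, not_and]
    intro _ h2
    have := char_toNat_le h2
    simp at this; omega

theorem upper_case (ch : Char) (h : PySem.Chars.isupper ch = true) :
    ∃ n, n < 26 ∧ ch = upChar n ∧ PySem.Chars.upperChar ch = ch
      ∧ PySem.Chars.lowerChar ch = loChar n := by
  simp only [PySem.Chars.isupper, Bool.and_eq_true, decide_eq_true_eq] at h
  have hlo : 65 ≤ ch.toNat := by simpa using char_toNat_le h.1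
  have hhi : ch.toNat ≤ 90 := by simpa using char_toNat_le h.2
  refine ⟨ch.toNat - 65, by omega, ?_, ?_, ?_⟩
  · rw [upChar, show 65 + (ch.toNat - 65) = ch.toNat by omega, Char.ofNat_toNat]
  · rw [PySem.Chars.upperChar, if_neg]
    simp only [PySem.Chars.islower, Bool.and_eq_true, decide_eq_true_eq, not_and]
    intro h1 _
    have := char_toNat_le h1
    simp at this; omega
  · rw [PySem.Chars.lowerChar, if_pos]
    · rw [loChar]; congr 1; omega
    · simp only [PySem.Chars.isupper, Bool.and_eq_true, decide_eq_true_eq]; exact h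

theorem lo_facts : ∀ i : Fin 26, PySem.Chars.isalpha (loChar i.val) = true
    ∧ PySem.Chars.upperChar (loChar i.val) = upChar i.val
    ∧ PySem.Chars.lowerChar (loChar i.val) = loChar i.val := by decide

theorem mem_strong_iff (L : List Char) (c : Char) :
    (c ∈ ((PySem.Set.ofList L).filter (fun ch =>
      PySem.Chars.isalpha ch && PySem.Set.contains (PySem.Set.ofList L) (PySem.Chars.upperChar ch)
        && PySem.Set.contains (PySem.Set.ofList L) (PySem.Chars.lowerChar ch))).map PySem.Chars.upperChar)
    ↔ ∃ n : Nat, n < 26 ∧ pvPb L n = true ∧ c = upChar n := by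
  have hcont : ∀ x : Char, PySem.Set.contains (PySem.Set.ofList L) x = true ↔ x ∈ L := by
    intro x
    simp [PySem.Set.contains, PySem.Set.mem_ofList]
  constructor
  · intro hmem
    obtain ⟨ch, hch, hc⟩ := List.mem_map.mp hmem
    obtain ⟨hchS, hq⟩ := List.mem_filter.mp hch
    have hchL : ch ∈ L := (PySem.Set.mem_ofList L ch).mp hchS
    simp only [Bool.and_eq_true] at hq
    obtain ⟨⟨halpha, hup⟩, hlo⟩ := hq
    rw [hcont] at hup hlo
    rcases Bool.or_eq_true _ _ |>.mp (by simpa [PySem.Chars.isalpha] using halpha) with hU | hL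
    · obtain ⟨n, hn, hche, hupe, hloe⟩ := upper_case ch hU
      refine ⟨n, hn, ?_, by rw [← hc, hupe, hche]⟩
      simp only [pvPb, Bool.and_eq_true, decide_eq_true_eq]
      exact ⟨hche ▸ hchL, hloe ▸ hlo⟩
    · obtain ⟨n, hn, hche, hupe, hloe⟩ := lower_case ch hL
      refine ⟨n, hn, ?_, by rw [← hc, hupe]⟩
      simp only [pvPb, Bool.and_eq_true, decide_eq_true_eq]
      exact ⟨hupe ▸ hup, hche ▸ hchL⟩
  · rintro ⟨n, hn, hp, rfl⟩
    simp only [pvPb, Bool.and_eq_true, decide_eq_true_eq] at hp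
    obtain ⟨ha, hu, hl⟩ := lo_facts ⟨n, hn⟩
    refine List.mem_map.mpr ⟨loChar n, List.mem_filter.mpr ⟨(PySem.Set.mem_ofList L _).mpr hp.2, ?_⟩, hu⟩
    simp only [Bool.and_eq_true]
    exact ⟨⟨ha, (hcont _).mpr (by rw [hu]; exact hp.1)⟩, (hcont _).mpr (by rw [hl]; exact hp.2)⟩

theorem aFun_no (L : List Char) : ∀ n : Nat, (∀ k, k < n → pvPb L k = false) → pvAFun L n = "NO" := by
  intro n
  induction n with
  | zero => intro _; rfl
  | succ n ih =>
    intro h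
    rw [pvAFun, if_neg (by simp [h n (by omega)])]
    exact ih (fun k hk => h k (by omega))

theorem aFun_top (L : List Char) (n0 : Nat) (h0 : pvPb L n0 = true) :
    ∀ n : Nat, n0 < n → (∀ k, n0 < k → k < n → pvPb L k = false) →
      pvAFun L n = String.ofList [upChar n0] := by
  intro n
  induction n with
  | zero => omega
  | succ n ih =>
    intro hlt h
    by_cases he : n = n0
    · subst he; rw [pvAFun, if_pos h0]
    · rw [pvAFun, if_neg (by simp [h n (by omega) (by omega)])]
      exact ih (by omega) (fun k hk1 hk2 => h k hk1 (by omega))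

theorem up_mono : ∀ a b : Fin 26, upChar a.val ≤ upChar b.val ↔ a.val ≤ b.val := by decide

-- ===== VERDICT (by name: the statement is the Claim_ definition above) =====
theorem strong_letter_spec : Claim_equal_strong_letter := by
  intro s _
  unfold Spec_strong_letter
  set L := s.toList with hL
  have hA : strong_letter s = pvAFun L 26 := by
    unfold strong_letter
    have := scan_eq L (L.foldl pvStepA PySem.Dict.empty) (count_spec L) 26 (by omega)
    simpa using this
  rw [hA]
  simp only [strong_letter_alt]
  set strongList := ((PySem.Set.ofList L).filter (fun ch =>
      PySem.Chars.isalpha ch && PySem.Set.contains (PySem.Set.ofList L) (PySem.Chars.upperChar ch)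
        && PySem.Set.contains (PySem.Set.ofList L) (PySem.Chars.lowerChar ch))).map PySem.Chars.upperChar
    with hsl
  have hmemS : ∀ c : Char, c ∈ PySem.Set.ofList strongList ↔
      ∃ n : Nat, n < 26 ∧ pvPb L n = true ∧ c = upChar n := by
    intro c
    rw [PySem.Set.mem_ofList]
    exact mem_strong_iff L c
  cases hmax : PySem.List.max? (PySem.Set.ofList strongList) (fun c => c) with
  | none =>
    have hempty : PySem.Set.ofList strongList = ([] : List Char) :=
      (PySem.List.max?_eq_none_iff _ _).mp hmax
    apply aFun_no
    intro k hk
    by_contra hkp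
    simp only [Bool.not_eq_false] at hkp
    have : upChar k ∈ PySem.Set.ofList strongList := (hmemS _).mpr ⟨k, hk, hkp, rfl⟩
    rw [hempty] at this
    exact absurd this (List.not_mem_nil)
  | some m =>
    obtain ⟨n0, hn0, hp0, hm⟩ := (hmemS m).mp (PySem.List.max?_mem hmax)
    have hmax' := PySem.List.max?_isMax hmax
    rw [hm]
    apply aFun_top L n0 hp0 26 hn0
    intro k hk1 hk2
    by_contra hkp
    simp only [Bool.not_eq_false] at hkp
    have hmemk : upChar k ∈ PySem.Set.ofList strongList := (hmemS _).mpr ⟨k, hk2, hkp, rfl⟩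
    have hle : upChar k ≤ m := hmax' _ hmemk
    rw [hm] at hle
    have := (up_mono ⟨k, hk2⟩ ⟨n0, hn0⟩).mp hle
    simp at this
    omega
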